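-- pv_equiv track=rewrite | github.com/avinashsp93/neetcode-all | python/l2_stack/p1598_crawler_log_folder.py | minOperations_stackApproach
-- ===== SOURCE A (Python) =====
-- from typing import List
--
-- def minOperations_stackApproach(logs: List[str]) -> int:
--     log_stack = []
--     for op in logs:
--         if op == "./":
--             continue
--         elif op == "../":
--             if log_stack:
--                 log_stack.pop()
--         else:
--             log_stack.append(op)
--     return len(log_stack)
-- ===== SOURCE B (Python) =====
-- from typing import List
--
-- def minOperations_stackApproach(logs: List[str]) -> int:
--     # Right-to-left scan: a "../" becomes a pending pop; a push op is either
--     # cancelled by a pending pop (nearest-match, like parentheses) or survives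
--     # and counts toward the final depth. Leftover pending pops hit the empty
--     # stack in A and are no-ops, so they are simply discarded.
--     count = 0
--     pending = 0
--     for op in reversed(logs):
--         if op == "../":
--             pending += 1
--         elif op != "./":
--             if pending:
--                 pending -= 1
--             else:
--                 count += 1
--     return count
-- ===== Notes on version B (the rewrite author's own statement) =====
-- stated objective: alternative
-- what changed: Replaces the left-to-right stack simulation by a right-to-left matching scan: '../' entries accumulate as pending pops that cancel the nearest earlier push, surviving pushes are counted, leftover pending pops are discarded (empty-stack no-ops).
import Mathlib
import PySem

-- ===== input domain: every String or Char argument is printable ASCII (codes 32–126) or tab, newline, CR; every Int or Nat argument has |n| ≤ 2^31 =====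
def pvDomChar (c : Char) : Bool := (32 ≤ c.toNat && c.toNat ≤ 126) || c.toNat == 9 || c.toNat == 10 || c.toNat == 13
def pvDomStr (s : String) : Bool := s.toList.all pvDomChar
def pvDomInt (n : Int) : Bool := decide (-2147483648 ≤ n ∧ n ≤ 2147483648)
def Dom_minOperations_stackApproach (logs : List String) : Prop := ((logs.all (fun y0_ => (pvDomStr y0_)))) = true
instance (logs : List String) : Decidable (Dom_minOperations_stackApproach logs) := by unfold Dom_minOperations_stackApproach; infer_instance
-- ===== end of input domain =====

-- B replaces A's left-to-right stack simulation by a right-to-left matching scan with a pending-pop counter; equivalence proved for all inputs.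


-- ===== PORT A =====
-- loop body of A: maintain the stack (top at head; append/pop at the head; only the length is returned)
def minOpsA_step (st : List String) (op : String) : List String :=
  if op = "./" then st
  else if op = "../" then (if st ≠ [] then st.tail else st)
  else op :: st

def minOperations_stackApproach (logs : List String) : Int :=
  ((logs.foldl minOpsA_step []).length : Int)

-- ===== PORT B =====
-- state: (count of surviving pushes, pending pops); loop runs over reversed logs
def minOpsB_step (s : Int × Int) (op : String) : Int × Int :=
  if op = "../" then (s.1, s.2 + 1)
  else if op ≠ "./" then (if s.2 ≠ 0 then (s.1, s.2 - 1) else (s.1 + 1, s.2))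
  else s

def minOperations_stackApproach_alt (logs : List String) : Int :=
  (logs.reverse.foldl minOpsB_step (0, 0)).1

-- ===== PRECONDITION & SPEC =====
def Spec_minOperations_stackApproach (logs : List String) (out : Int) : Prop := out = minOperations_stackApproach_alt logs
instance (logs : List String) (out : Int) : Decidable (Spec_minOperations_stackApproach logs out) := by unfold Spec_minOperations_stackApproach; infer_instance

-- ===== CLAIM (what is proved, stated in full; the proofs are below) =====
def Claim_equal_minOperations_stackApproach : Prop := ∀ (logs : List String), Dom_minOperations_stackApproach logs → Spec_minOperations_stackApproach logs (minOperations_stackApproach logs)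

-- ===== LEMMAS AND PROOFS =====
-- B's reversed-loop fold equals a foldr over the original list
theorem minOpsB_as_foldr (logs : List String) :
    logs.reverse.foldl minOpsB_step (0, 0) = logs.foldr (fun op s => minOpsB_step s op) (0, 0) := by
  simp [List.foldl_reverse]

-- both state components of B stay nonnegative
theorem minOpsB_nonneg (logs : List String) :
    0 ≤ (logs.foldr (fun op s => minOpsB_step s op) (0, 0)).1 ∧
    0 ≤ (logs.foldr (fun op s => minOpsB_step s op) (0, 0)).2 := by
  induction logs with
  | nil => constructor <;> decide
  | cons op rest ih =>
    obtain ⟨h1, h2⟩ := ih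
    simp only [List.foldr_cons]
    generalize hgen : List.foldr (fun op s => minOpsB_step s op) (0, 0) rest = r at h1 h2 ⊢
    obtain ⟨c, p⟩ := r
    simp only at h1 h2
    unfold minOpsB_step
    split_ifs <;> constructor <;> simp <;> omega

-- invariant: starting A from any stack st, the final length is (surviving pushes)
-- plus whatever of st remains after the unmatched pending pops
theorem minOps_invariant (logs : List String) (st : List String) :
    ((logs.foldl minOpsA_step st).length : Int) =
      (logs.foldr (fun op s => minOpsB_step s op) (0, 0)).1 +
      max 0 ((st.length : Int) - (logs.foldr (fun op s => minOpsB_step s op) (0, 0)).2) := by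
  induction logs generalizing st with
  | nil => simp
  | cons op rest ih =>
    obtain ⟨hc, hp⟩ := minOpsB_nonneg rest
    simp only [List.foldl_cons, List.foldr_cons]
    rw [ih]
    generalize hgen : List.foldr (fun op s => minOpsB_step s op) (0, 0) rest = r at hc hp ⊢
    obtain ⟨c, p⟩ := r
    simp only at hc hp
    by_cases h1 : op = "./"
    · simp [minOpsA_step, minOpsB_step, h1]
    · by_cases h2 : op = "../"
      · subst h2
        cases st with
        | nil => simp [minOpsA_step, minOpsB_step] <;> omega
        | cons x xs => simp [minOpsA_step, minOpsB_step] <;> omega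
      · by_cases h3 : p = 0
        · simp [minOpsA_step, minOpsB_step, h1, h2, h3] <;> omega
        · simp [minOpsA_step, minOpsB_step, h1, h2, h3] <;> omega

-- ===== VERDICT (by name: the statement is the Claim_ definition above) =====
theorem minOperations_stackApproach_spec : Claim_equal_minOperations_stackApproach := by
  intro logs _
  show _ = _
  unfold minOperations_stackApproach minOperations_stackApproach_alt
  rw [minOpsB_as_foldr]
  have h := minOps_invariant logs []
  have hnn := minOpsB_nonneg logs
  simp at h
  omega
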